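-- pv_equiv track=rewrite | github.com/edwardianec/hystogram_equalization | fuzzy_processing_v6.py | find_histogram_borders
-- ===== SOURCE A (Python) =====
-- def find_histogram_borders(h):
-- 	for index, el in enumerate(h):
-- 		if (el>0):
-- 			left = index
-- 			break
-- 	for index, el in enumerate(h):
-- 		if (el>40):
-- 			right = index
--
-- 	return (left, right)
-- ===== SOURCE B (Python) =====
-- def find_histogram_borders(h):
--     found_left = False
--     for index, el in enumerate(h):
--         if not found_left and el > 0:
--             left = index
--             found_left = True
--         if el > 40:
--             right = index
--     return (left, right)
-- ===== Notes on version B (the rewrite author's own statement) =====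
-- stated objective: alternative
-- what changed: A scans the list twice (one loop with break for the first positive index, a second full loop for the last index exceeding 40); B fuses them into a single pass that maintains a found_left flag and updates both borders in one traversal.
import Mathlib
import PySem

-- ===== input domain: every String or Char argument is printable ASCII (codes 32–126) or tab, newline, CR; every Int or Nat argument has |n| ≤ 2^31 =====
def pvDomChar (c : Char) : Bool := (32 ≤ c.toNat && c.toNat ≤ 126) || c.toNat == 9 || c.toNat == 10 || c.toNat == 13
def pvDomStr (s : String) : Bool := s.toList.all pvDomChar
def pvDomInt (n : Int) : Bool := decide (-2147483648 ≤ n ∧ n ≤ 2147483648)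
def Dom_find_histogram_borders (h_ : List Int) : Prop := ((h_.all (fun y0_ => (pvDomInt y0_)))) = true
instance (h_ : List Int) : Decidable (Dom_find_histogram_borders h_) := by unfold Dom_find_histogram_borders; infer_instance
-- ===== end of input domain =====

-- ===== PORT A =====
-- A: first loop (with break) finds the first index with el > 0; second loop keeps
-- overwriting `right`, ending with the last index with el > 40. Unmatched cases raise
-- UnboundLocalError in Python and are excluded by Pre_ (ports use getD 0 there).
def pvFirstPos : List Int → Int → Option Int
  | [], _ => none
  | e :: t, i => if e > 0 then some i else pvFirstPos t (i + 1)

def pvLastOver : List Int → Int → Option Int → Option Int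
  | [], _, r => r
  | e :: t, i, r => pvLastOver t (i + 1) (if e > 40 then some i else r)

def find_histogram_borders (h_ : List Int) : Int × Int :=
  ((pvFirstPos h_ 0).getD 0, (pvLastOver h_ 0 none).getD 0)

-- ===== PORT B =====
-- B: one fused pass; `left` is set only while still none (found_left flag), `right`
-- is overwritten on every el > 40.
def pvFuse : List Int → Int → Option Int × Option Int → Option Int × Option Int
  | [], _, s => s
  | e :: t, i, (l, r) =>
      pvFuse t (i + 1)
        ((if l = none ∧ e > 0 then some i else l), (if e > 40 then some i else r))

def find_histogram_borders_alt (h_ : List Int) : Int × Int :=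
  match pvFuse h_ 0 (none, none) with
  | (l, r) => (l.getD 0, r.getD 0)

-- ===== PRECONDITION & SPEC =====
-- Pre_ excludes exactly the inputs where Python A raises UnboundLocalError:
-- no element > 0 (left unset) or no element > 40 (right unset). B raises there too.
def Pre_find_histogram_borders (h_ : List Int) : Prop :=
  (∃ x ∈ h_, x > 0) ∧ (∃ x ∈ h_, x > 40)
instance (h_ : List Int) : Decidable (Pre_find_histogram_borders h_) := by
  unfold Pre_find_histogram_borders; infer_instance
def pvWitness_find_histogram_borders : List Int := [0, 5, 50, 3]

def Spec_find_histogram_borders (h_ : List Int) (out : Int × Int) : Prop := out = find_histogram_borders_alt h_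
instance (h_ : List Int) (out : Int × Int) : Decidable (Spec_find_histogram_borders h_ out) := by unfold Spec_find_histogram_borders; infer_instance

-- ===== CLAIM (what is proved, stated in full; the proofs are below) =====
def Claim_equal_find_histogram_borders : Prop := ∀ (h_ : List Int), Dom_find_histogram_borders h_ → Pre_find_histogram_borders h_ → Spec_find_histogram_borders h_ (find_histogram_borders h_)

-- ===== LEMMAS AND PROOFS =====
theorem pvFuse_eq (h : List Int) : ∀ (i : Int) (l r : Option Int),
    pvFuse h i (l, r) =
      ((match l with | some x => some x | none => pvFirstPos h i), pvLastOver h i r) := by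
  induction h with
  | nil => intro i l r; cases l <;> simp [pvFuse, pvFirstPos, pvLastOver]
  | cons e t ih =>
      intro i l r
      cases l with
      | some x => simp [pvFuse, pvLastOver, ih]
      | none =>
          by_cases he : e > 0 <;>
            simp [pvFuse, pvFirstPos, pvLastOver, he, ih]

-- ===== VERDICT (by name: the statement is the Claim_ definition above) =====
theorem find_histogram_borders_spec : Claim_equal_find_histogram_borders := by
  intro h_ _ _
  unfold Spec_find_histogram_borders find_histogram_borders find_histogram_borders_alt
  rw [pvFuse_eq]
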